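-- pv_equiv track=rewrite | github.com/ganeshskudva/Leetcode-Python | Medium/L2064.py | minimizedMaximum
-- ===== SOURCE A (Python) =====
-- from typing import List
--
-- def minimizedMaximum(n: int, quantities: List[int]) -> int:
--     # Helper function to check if a given `val` can distribute the quantities
--     # such that no store gets more than `val` items, using at most `n` stores.
--     def is_feasible(val):
--         # Calculate the total number of stores needed if the maximum items
--         # per store is limited to `val`. Use ceiling division with:
--         # (num + val - 1) // val to avoid floating-point division.
--         return sum((num + val - 1) // val for num in quantities) > n
--
--     # Binary search range: minimum value is 1 (at least 1 item per store),
--     # and the maximum value is the largest quantity in the array.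
--     left, right = 1, max(quantities)
--
--     # Perform binary search to find the minimized maximum value
--     while left < right:
--         mid = left + (right - left) // 2  # Calculate the middle point
--
--         # If `mid` is not feasible, increase `left` to search higher values
--         if is_feasible(mid):
--             left = mid + 1
--         else:
--             # If feasible, search lower values to minimize the maximum
--             right = mid
--
--     # `left` now holds the minimized maximum value
--     return left
-- ===== SOURCE B (Python) =====
-- from typing import List
--
-- def minimizedMaximum(n: int, quantities: List[int]) -> int:
--     def stores(cap):
--         # total stores used when no store holds more than cap items
--         total = 0
--         for q in quantities:
--             k, r = divmod(q, cap)
--             total += k + (r != 0)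
--         return total
--
--     def search(lo, size):
--         # the answer lies among the `size` consecutive values starting at lo
--         if size <= 1:
--             return lo
--         left_half = (size + 1) // 2
--         probe = lo + left_half - 1
--         if stores(probe) > n:
--             return search(probe + 1, size - left_half)
--         return search(lo, left_half)
--
--     return search(1, max(quantities))
-- ===== Notes on version B (the rewrite author's own statement) =====
-- stated objective: alternative
-- what changed: A's iterative two-pointer loop (left/right, generator-sum of (q+val-1)//val) becomes a recursion on (start, size) half-intervals whose store count is an explicit divmod accumulator (q//cap plus one when the remainder is nonzero); same probe semantics, different decomposition.
import Mathlib
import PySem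

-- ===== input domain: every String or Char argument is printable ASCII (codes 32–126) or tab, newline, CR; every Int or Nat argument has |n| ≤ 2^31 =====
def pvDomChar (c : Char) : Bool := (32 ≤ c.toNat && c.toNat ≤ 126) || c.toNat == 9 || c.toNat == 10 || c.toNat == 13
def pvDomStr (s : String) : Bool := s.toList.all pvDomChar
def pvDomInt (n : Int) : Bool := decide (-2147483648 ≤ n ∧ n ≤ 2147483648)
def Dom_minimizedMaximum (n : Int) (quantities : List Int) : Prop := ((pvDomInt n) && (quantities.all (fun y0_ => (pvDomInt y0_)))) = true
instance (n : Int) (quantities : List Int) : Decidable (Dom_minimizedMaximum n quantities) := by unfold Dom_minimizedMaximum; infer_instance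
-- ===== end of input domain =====

-- B recomputes A's search as a recursion on (start, size) half-intervals with a
-- divmod store counter, replacing A's iterative left/right loop over a ceiling sum;
-- objective: a different decomposition of the same cost.

-- ===== PORT A =====
-- sum((num + val - 1) // val for num in quantities)
def pyNeeded (quantities : List Int) (val : Int) : Int :=
  quantities.foldl (fun s num => s + PySem.Int.floordiv (num + val - 1) val) 0

-- while left < right: mid = left + (right-left)//2; if is_feasible(mid): left = mid+1 else right = mid
def pyLoopA (n : Int) (quantities : List Int) (left right : Int) : Int :=
  if left < right then
    let mid := left + PySem.Int.floordiv (right - left) 2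
    if pyNeeded quantities mid > n then pyLoopA n quantities (mid + 1) right
    else pyLoopA n quantities left mid
  else left
termination_by (right - left).toNat
decreasing_by
  · have h := PySem.Int.floordiv_two_mid_bounds (le_of_lt (by omega : left < right))
    simp only [PySem.Int.floordiv_eq_ediv_of_pos (by omega : (0:Int) < 2)] at *
    omega
  · have h : PySem.Int.floordiv (right - left) 2 < right - left := by
      rw [PySem.Int.floordiv_lt_iff_lt_mul (by omega : (0:Int) < 2)]; omega
    omega

def minimizedMaximum (n : Int) (quantities : List Int) : Int :=
  match PySem.List.max? quantities (fun x => x) with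
  | none => 0   -- Python raises ValueError on max([]); excluded by Pre_
  | some mx => pyLoopA n quantities 1 mx

-- ===== PORT B =====
-- total = 0; for q in quantities: k, r = divmod(q, cap); total += k + (r != 0)
-- (cap ≥ 1 at every call site, so divmod never raises; floordiv/mod are its two components)
def altStores (quantities : List Int) (cap : Int) : Int :=
  quantities.foldl
    (fun total q =>
      total + (PySem.Int.floordiv q cap + (if PySem.Int.mod q cap ≠ 0 then 1 else 0))) 0

-- def search(lo, size): size <= 1 → lo; left_half = (size+1)//2; probe = lo + left_half - 1; …
def altSearch (n : Int) (quantities : List Int) (lo size : Int) : Int :=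
  if size ≤ 1 then lo
  else
    let leftHalf := PySem.Int.floordiv (size + 1) 2
    let probe := lo + leftHalf - 1
    if altStores quantities probe > n then altSearch n quantities (probe + 1) (size - leftHalf)
    else altSearch n quantities lo leftHalf
termination_by size.toNat
decreasing_by
  · have h : 1 ≤ PySem.Int.floordiv (size + 1) 2 := by
      rw [PySem.Int.le_floordiv_iff_mul_le (by omega : (0:Int) < 2)]; omega
    omega
  · have h : PySem.Int.floordiv (size + 1) 2 < size := by
      rw [PySem.Int.floordiv_lt_iff_lt_mul (by omega : (0:Int) < 2)]; omega
    have h0 : 1 ≤ PySem.Int.floordiv (size + 1) 2 := by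
      rw [PySem.Int.le_floordiv_iff_mul_le (by omega : (0:Int) < 2)]; omega
    omega

def minimizedMaximum_alt (n : Int) (quantities : List Int) : Int :=
  match PySem.List.max? quantities (fun x => x) with
  | none => 0   -- max([]) raises in B too; excluded by Pre_
  | some mx => altSearch n quantities 1 mx

-- ===== PRECONDITION & SPEC =====
-- Pre_ excludes only the empty list, on which A (and B) raise ValueError at max(quantities).
def Pre_minimizedMaximum (n : Int) (quantities : List Int) : Prop := quantities ≠ []
instance (n : Int) (quantities : List Int) : Decidable (Pre_minimizedMaximum n quantities) := by
  unfold Pre_minimizedMaximum; infer_instance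

def pvWitness_minimizedMaximum : Int × List Int := (4, [3, 7, 2])

def Spec_minimizedMaximum (n : Int) (quantities : List Int) (out : Int) : Prop := out = minimizedMaximum_alt n quantities
instance (n : Int) (quantities : List Int) (out : Int) : Decidable (Spec_minimizedMaximum n quantities out) := by unfold Spec_minimizedMaximum; infer_instance

-- ===== CLAIM (what is proved, stated in full; the proofs are below) =====
def Claim_equal_minimizedMaximum : Prop := ∀ (n : Int) (quantities : List Int), Dom_minimizedMaximum n quantities → Pre_minimizedMaximum n quantities → Spec_minimizedMaximum n quantities (minimizedMaximum n quantities)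

-- ===== LEMMAS AND PROOFS =====

-- A's ceiling division (q + v - 1) // v and B's q // v + (q % v != 0) agree for v > 0
lemma ceil_eq (q v : Int) (hv : 0 < v) :
    PySem.Int.floordiv q v + (if PySem.Int.mod q v ≠ 0 then 1 else 0)
      = PySem.Int.floordiv (q + v - 1) v := by
  have hdm := PySem.Int.floordiv_mul_add_mod q v
  have hr0 : 0 ≤ PySem.Int.mod q v := PySem.Int.mod_nonneg q hv
  have hrv : PySem.Int.mod q v < v := PySem.Int.mod_lt q hv
  set d := PySem.Int.floordiv q v with hd
  set r := PySem.Int.mod q v with hr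
  by_cases h0 : r = 0
  · rw [if_neg (by omega)]
    rw [eq_comm, PySem.Int.floordiv_eq_iff_of_pos hv]
    constructor <;> nlinarith
  · have h1 : 1 ≤ r := by omega
    rw [if_pos h0]
    rw [eq_comm, PySem.Int.floordiv_eq_iff_of_pos hv]
    constructor <;> nlinarith
lemma stores_eq (quantities : List Int) (v : Int) (hv : 0 < v) :
    altStores quantities v = pyNeeded quantities v := by
  unfold altStores pyNeeded
  rw [PySem.List.foldl_add, PySem.List.foldl_add]
  have h2 : List.map (fun q => PySem.Int.floordiv q v + (if PySem.Int.mod q v ≠ 0 then 1 else 0)) quantities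
      = List.map (fun num => PySem.Int.floordiv (num + v - 1) v) quantities :=
    List.map_congr_left (fun q _ => ceil_eq q v hv)
  rw [h2]

-- the two searches visit the same probes and halve the same interval, written as
-- (left, right) in A and as (start, size) in B
lemma loop_eq (n : Int) (qs : List Int) :
    ∀ m : Nat, ∀ left right : Int, (right - left).toNat ≤ m → 1 ≤ left →
      pyLoopA n qs left right = altSearch n qs left (right - left + 1) := by
  intro m
  induction m with
  | zero =>
    intro left right hm hl
    rw [pyLoopA, if_neg (show ¬ left < right by omega), altSearch, if_pos (show right - left + 1 ≤ 1 by omega)]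
  | succ m ih =>
    intro left right hm hl
    by_cases hlt : left < right
    · rw [pyLoopA, if_pos hlt, altSearch, if_neg (show ¬ right - left + 1 ≤ 1 by omega)]
      dsimp only
      have e2 : PySem.Int.floordiv (right - left + 1 + 1) 2
          = PySem.Int.floordiv (right - left) 2 + 1 := by
        rw [PySem.Int.floordiv_eq_ediv_of_pos (by omega : (0:Int) < 2),
          PySem.Int.floordiv_eq_ediv_of_pos (by omega : (0:Int) < 2)]
        omega
      have hmid := PySem.Int.floordiv_two_mid_bounds (le_of_lt (by omega : left < right))
      have hmidlt : PySem.Int.floordiv (right - left) 2 < right - left := by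
        rw [PySem.Int.floordiv_lt_iff_lt_mul (by omega : (0:Int) < 2)]; omega
      have hmid0 : 0 ≤ PySem.Int.floordiv (right - left) 2 := by
        rw [PySem.Int.le_floordiv_iff_mul_le (by omega : (0:Int) < 2)]; omega
      have hprobe : left + PySem.Int.floordiv (right - left + 1 + 1) 2 - 1
          = left + PySem.Int.floordiv (right - left) 2 := by omega
      rw [hprobe, stores_eq qs _ (by omega)]
      split_ifs with hfeas
      · have hsz : right - left + 1 - PySem.Int.floordiv (right - left + 1 + 1) 2
            = right - (left + PySem.Int.floordiv (right - left) 2 + 1) + 1 := by omega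
        rw [hsz]
        have hgoal := ih (left + PySem.Int.floordiv (right - left) 2 + 1) right (by omega) (by omega)
        exact hgoal
      · have hsz : PySem.Int.floordiv (right - left + 1 + 1) 2
            = (left + PySem.Int.floordiv (right - left) 2) - left + 1 := by omega
        rw [hsz]
        exact ih left _ (by omega) hl
    · rw [pyLoopA, if_neg hlt, altSearch, if_pos (show right - left + 1 ≤ 1 by omega)]

-- ===== VERDICT (by name: the statement is the Claim_ definition above) =====
theorem minimizedMaximum_spec : Claim_equal_minimizedMaximum := by
  unfold Claim_equal_minimizedMaximum
  intro n qs _ hne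
  unfold Spec_minimizedMaximum
  cases hmax : PySem.List.max? qs (fun x => x) with
  | none =>
    exact absurd ((PySem.List.max?_eq_none_iff qs (fun x => x)).mp hmax) hne
  | some mx =>
    simp only [minimizedMaximum, minimizedMaximum_alt, hmax]
    have h := loop_eq n qs (mx - 1).toNat 1 mx le_rfl le_rfl
    rwa [show mx - 1 + 1 = mx by omega] at h
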